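-- pv_equiv track=rewrite | github.com/Gabrinas/Cryptography | gcd_euclidean.py | gcdm
-- ===== SOURCE A (Python) =====
-- def gcdm(a, b):
--     ls = []
--     while b != 0:
--         p = a; q = b
--         res = p % q
--         ls.append([b, res])
--         a = b; b = res
--     return a, ls
-- ===== SOURCE B (Python) =====
-- def gcdm(a, b):
--     if b == 0:
--         return a, []
--     res = a % b
--     g, rest = gcdm(b, res)
--     return g, [[b, res]] + rest
-- ===== Notes on version B (the rewrite author's own statement) =====
-- stated objective: alternative
-- what changed: Replaces the iterative while-loop with an appended list accumulator by structural recursion on the Euclidean recurrence that builds the step list by prepending on the way back up.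
import Mathlib
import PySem

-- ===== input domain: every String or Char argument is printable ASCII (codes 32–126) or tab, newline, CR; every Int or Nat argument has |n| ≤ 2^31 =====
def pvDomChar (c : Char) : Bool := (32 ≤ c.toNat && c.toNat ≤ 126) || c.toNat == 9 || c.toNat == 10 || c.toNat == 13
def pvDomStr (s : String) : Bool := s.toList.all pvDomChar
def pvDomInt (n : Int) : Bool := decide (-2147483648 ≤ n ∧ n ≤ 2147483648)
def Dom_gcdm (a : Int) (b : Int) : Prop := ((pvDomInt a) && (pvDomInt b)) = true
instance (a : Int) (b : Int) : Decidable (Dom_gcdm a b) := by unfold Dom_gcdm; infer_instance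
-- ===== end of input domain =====

-- B replaces A's iterative loop (appending to an accumulator list) by structural
-- recursion on the Euclidean recurrence, prepending each step on the way back up.


-- Python's % magnitude strictly decreases: the loop/recursion terminates.
theorem pyMod_natAbs_lt (a b : Int) (hb : b ≠ 0) :
    (PySem.Int.mod a b).natAbs < b.natAbs := by
  rcases lt_or_gt_of_ne hb with h | h
  · have := PySem.Int.mod_neg_bounds a h
    omega
  · have h1 := PySem.Int.mod_nonneg a h
    have h2 := PySem.Int.mod_lt a h
    omega

-- ===== PORT A =====
-- the while-loop of A, with its growing list `ls` threaded as an accumulator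
def gcdmLoop (a b : Int) (ls : List (List Int)) : Int × List (List Int) :=
  if hb : b = 0 then (a, ls)
  else
    let res := PySem.Int.mod a b
    gcdmLoop b res (ls ++ [[b, res]])
termination_by b.natAbs
decreasing_by exact pyMod_natAbs_lt a b hb

def gcdm (a : Int) (b : Int) : Int × List (List Int) := gcdmLoop a b []

-- ===== PORT B =====
def gcdm_alt (a : Int) (b : Int) : Int × List (List Int) :=
  if hb : b = 0 then (a, [])
  else
    let res := PySem.Int.mod a b
    let r := gcdm_alt b res
    (r.1, [b, res] :: r.2)
termination_by b.natAbs
decreasing_by exact pyMod_natAbs_lt a b hb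

-- ===== PRECONDITION & SPEC =====
def Spec_gcdm (a : Int) (b : Int) (out : Int × List (List Int)) : Prop := out = gcdm_alt a b
instance (a : Int) (b : Int) (out : Int × List (List Int)) : Decidable (Spec_gcdm a b out) := by unfold Spec_gcdm; infer_instance

-- ===== CLAIM (what is proved, stated in full; the proofs are below) =====
def Claim_equal_gcdm : Prop := ∀ (a : Int) (b : Int), Dom_gcdm a b → Spec_gcdm a b (gcdm a b)

-- ===== LEMMAS AND PROOFS =====
theorem gcdmLoop_eq (a b : Int) (ls : List (List Int)) :
    gcdmLoop a b ls = ((gcdm_alt a b).1, ls ++ (gcdm_alt a b).2) := by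
  induction a, b, ls using gcdmLoop.induct with
  | case1 a ls =>
      rw [gcdmLoop, gcdm_alt]; simp
  | case2 a b ls hb res ih =>
      rw [gcdmLoop, gcdm_alt]
      simp only [hb, dite_false]
      rw [ih]
      simp only [List.append_assoc, List.singleton_append]
      rfl

-- ===== VERDICT (by name: the statement is the Claim_ definition above) =====
theorem gcdm_spec : Claim_equal_gcdm := by
  intro a b _
  unfold Spec_gcdm gcdm
  rw [gcdmLoop_eq]
  simp
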